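-- pv_equiv track=rewrite | github.com/jxtrt/electroapi | electroapi/scheduler.py | n_blocks
-- ===== SOURCE A (Python) =====
-- from typing import List, Dict, Tuple, Union
--
-- def n_blocks(hours: List[Tuple[int]]) -> int:
--     """Calculate the number of consecutive hour blocks in a list of hours."""
--     if not hours:
--         return 0
--     hours = sorted([h[0] for h in hours])
--     _n_blocks = 1
--     for i in range(len(hours) - 1):
--         if hours[i] != hours[i + 1] - 1:
--             _n_blocks += 1
--     return _n_blocks
-- ===== SOURCE B (Python) =====
-- def n_blocks(hours):
--     """Calculate the number of consecutive hour blocks in a list of hours."""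
--     s = {h[0] for h in hours}
--     return len(hours) - sum(1 for v in s if v + 1 in s)
-- ===== Notes on version B (the rewrite author's own statement) =====
-- stated objective: alternative
-- what changed: Replaces the sort-and-adjacent-pair scan by a hash set of the hour values: the answer is len(hours) minus the number of distinct values whose successor is also present, so no sorting and no pairwise scan is performed.
import Mathlib
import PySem

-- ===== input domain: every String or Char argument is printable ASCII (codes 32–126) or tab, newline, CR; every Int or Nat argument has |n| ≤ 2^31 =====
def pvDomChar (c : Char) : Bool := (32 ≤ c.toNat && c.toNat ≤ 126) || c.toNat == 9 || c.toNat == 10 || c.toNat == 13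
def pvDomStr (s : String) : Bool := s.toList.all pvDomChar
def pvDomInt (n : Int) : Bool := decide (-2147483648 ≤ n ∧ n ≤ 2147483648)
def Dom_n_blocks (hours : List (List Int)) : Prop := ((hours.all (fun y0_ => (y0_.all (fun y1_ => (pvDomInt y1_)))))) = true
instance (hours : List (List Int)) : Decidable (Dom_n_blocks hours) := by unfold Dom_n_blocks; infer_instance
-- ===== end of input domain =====

-- B replaces A's sort-and-adjacent-pair scan by a set of the hour values (len(hours) minus the
-- number of distinct values whose successor is present); objective: alternative algorithm.

-- ===== PORT A =====
def n_blocks (hours : List (List Int)) : Int :=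
  if hours = [] then 0
  else
    let hs := PySem.List.sorted (hours.map (fun h => PySem.List.pyGetD h 0 0)) (fun x => x) false
    (PySem.List.pyRange 0 ((hs.length : Int) - 1) 1).foldl
      (fun acc i =>
        if PySem.List.pyGetD hs i 0 ≠ PySem.List.pyGetD hs (i + 1) 0 - 1 then acc + 1 else acc) 1

-- ===== PORT B =====
def n_blocks_alt (hours : List (List Int)) : Int :=
  let s : PySem.Set Int := PySem.Set.ofList (hours.map (fun h => PySem.List.pyGetD h 0 0))
  (hours.length : Int) - (s.countP (fun v => PySem.Set.contains s (v + 1)) : Int)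

-- ===== PRECONDITION & SPEC =====
-- Pre_ excludes inputs containing an empty inner list: there Python's h[0] raises IndexError (in A and in B alike).
def Pre_n_blocks (hours : List (List Int)) : Prop := ∀ h ∈ hours, h ≠ []
instance (hours : List (List Int)) : Decidable (Pre_n_blocks hours) := by unfold Pre_n_blocks; infer_instance
def pvWitness_n_blocks : List (List Int) := [[3], [1], [2], [7], [7]]

def Spec_n_blocks (hours : List (List Int)) (out : Int) : Prop := out = n_blocks_alt hours
instance (hours : List (List Int)) (out : Int) : Decidable (Spec_n_blocks hours out) := by unfold Spec_n_blocks; infer_instance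

-- ===== CLAIM (what is proved, stated in full; the proofs are below) =====
def Claim_equal_n_blocks : Prop := ∀ (hours : List (List Int)), Dom_n_blocks hours → Pre_n_blocks hours → Spec_n_blocks hours (n_blocks hours)

-- ===== LEMMAS AND PROOFS =====

/-- Number of adjacent pairs `(x, x+1)` in a list (A's sorted scan counts the complement). -/
def adjCount : List Int → Nat
  | a :: b :: t => (if b = a + 1 then 1 else 0) + adjCount (b :: t)
  | _ => 0

/-- A's index-based adjacency count is `adjCount`. -/
lemma countP_range_adj (l : List Int) :
    (List.range (l.length - 1)).countP (fun i => decide (l.getD i 0 = l.getD (i + 1) 0 - 1)) =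
      adjCount l := by
  induction l with
  | nil => simp [adjCount]
  | cons a l ih =>
    cases l with
    | nil => simp [adjCount]
    | cons b t =>
      rw [show (a :: b :: t).length - 1 = ((b :: t).length - 1) + 1 by simp,
        List.range_succ_eq_map]
      simp only [List.countP_cons, List.countP_map]
      rw [show ((fun i => decide ((a :: b :: t).getD i 0 = (a :: b :: t).getD (i + 1) 0 - 1)) ∘
            (· + 1)) = fun i => decide ((b :: t).getD i 0 = (b :: t).getD (i + 1) 0 - 1) by
          funext i; simp [List.getD_cons_succ], ih, adjCount]
      simp [List.getD_cons_zero, List.getD_cons_succ]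
      by_cases h : b = a + 1
      · simp [h]; omega
      · simp [h]; omega

/-- On a `≤`-sorted list, `adjCount` counts the distinct values whose successor occurs. -/
lemma adjCount_sorted (l : List Int) (hs : l.Pairwise (· ≤ ·)) :
    adjCount l = l.dedup.countP (fun v => decide ((v + 1) ∈ l)) := by
  induction l with
  | nil => simp [adjCount]
  | cons a l ih =>
    cases l with
    | nil => simp [adjCount]
    | cons b t =>
      have hab : a ≤ b := (List.pairwise_cons.1 hs).1 b (by simp)
      have htail : (b :: t).Pairwise (· ≤ ·) := (List.pairwise_cons.1 hs).2
      have hge : ∀ x ∈ b :: t, b ≤ x := by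
        intro x hx
        rcases List.mem_cons.1 hx with h | h
        · omega
        · exact List.rel_of_pairwise_cons htail h
      by_cases heq : a = b
      · subst heq
        have hmem : a ∈ a :: t := by simp
        rw [List.dedup_cons_of_mem hmem]
        have : (a :: t).dedup.countP (fun v => decide ((v + 1) ∈ a :: a :: t)) =
            (a :: t).dedup.countP (fun v => decide ((v + 1) ∈ a :: t)) := by
          apply List.countP_congr
          intro v hv
          simp only [decide_eq_true_eq, List.mem_cons]
          tauto
        rw [this, ← ih htail, adjCount]
        have : ¬ (a = a + 1) := by omega
        simp [adjCount, this]
      · have hlt : a < b := lt_of_le_of_ne hab heq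
        have hnmem : a ∉ b :: t := fun hmem => by have := hge a hmem; omega
        rw [List.dedup_cons_of_notMem hnmem, List.countP_cons]
        have hsucc : (decide ((a + 1) ∈ a :: b :: t) : Bool) = decide (b = a + 1) := by
          simp only [decide_eq_decide, List.mem_cons]
          constructor
          · rintro (h | h | h)
            · omega
            · omega
            · have := hge _ (List.mem_cons_of_mem b h); omega
          · intro h; right; left; omega
        have hcong : (b :: t).dedup.countP (fun v => decide ((v + 1) ∈ a :: b :: t)) =
            (b :: t).dedup.countP (fun v => decide ((v + 1) ∈ b :: t)) := by
          apply List.countP_congr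
          intro v hv
          have hvmem : v ∈ b :: t := List.mem_dedup.1 hv
          have hvb := hge v hvmem
          have hne : v + 1 ≠ a := by omega
          simp only [decide_eq_true_eq, List.mem_cons]
          tauto
        rw [hcong, ← ih htail, adjCount, hsucc]
        by_cases h : b = a + 1 <;> simp [h] <;> omega

-- ===== VERDICT (by name: the statement is the Claim_ definition above) =====
theorem n_blocks_spec : Claim_equal_n_blocks := by
  intro hours _ _
  unfold Spec_n_blocks n_blocks n_blocks_alt
  by_cases hnil : hours = []
  · subst hnil; rfl
  · rw [if_neg hnil]
    simp only []
    set xs := hours.map (fun h => PySem.List.pyGetD h 0 0) with hxs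
    set hs := PySem.List.sorted xs (fun x => x) false with hhs
    have hxlen : xs.length = hours.length := by simp [hxs]
    have hslen : hs.length = xs.length := by rw [hhs, PySem.List.length_sorted]
    have hpos : 1 ≤ hs.length := by
      have := List.length_pos_iff.mpr hnil
      omega
    have h1 : ((hs.length : Int) - 1) = ((hs.length - 1 : Nat) : Int) := by omega
    rw [h1, PySem.List.pyRange_zero_natCast, List.foldl_map]
    have h2 : ∀ (acc : Int) (i : Nat),
        (if PySem.List.pyGetD hs ((i : Nat) : Int) 0 ≠ PySem.List.pyGetD hs (((i : Nat) : Int) + 1) 0 - 1 then acc + 1 else acc)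
          = (if ¬ (hs.getD i 0 = hs.getD (i + 1) 0 - 1) then acc + 1 else acc) := by
      intro acc i
      have hcast : ((i : Int) + 1) = ((i + 1 : Nat) : Int) := by push_cast; ring
      rw [hcast, PySem.List.pyGetD_natCast, PySem.List.pyGetD_natCast]
    simp only [h2]
    rw [PySem.List.foldl_ite_add_one]
    have hA : (List.range (hs.length - 1)).countP
        (fun x => decide ¬hs.getD x 0 = hs.getD (x + 1) 0 - 1) =
        (List.range (hs.length - 1)).countP
        (fun x => !decide (hs.getD x 0 = hs.getD (x + 1) 0 - 1)) := by
      apply List.countP_congr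
      intro x hx
      by_cases h : hs.getD x 0 = hs.getD (x + 1) 0 - 1 <;> simp [h]
    rw [hA]
    have hcnt := countP_range_adj hs
    have hlenrange := List.length_eq_countP_add_countP
      (l := List.range (hs.length - 1)) (p := fun i => decide (hs.getD i 0 = hs.getD (i + 1) 0 - 1))
    rw [List.length_range] at hlenrange
    have step1 : (PySem.Set.ofList xs).countP (fun v => PySem.Set.contains (PySem.Set.ofList xs) (v + 1)) =
        (PySem.Set.ofList xs).countP (fun v => decide ((v + 1) ∈ xs)) := by
      apply List.countP_congr
      intro v hv
      by_cases h : (v + 1) ∈ xs <;>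
        simp [PySem.Set.contains_eq_listContains, PySem.Set.mem_ofList, h]
    have hperm : (PySem.Set.ofList xs).Perm hs.dedup := by
      rw [List.perm_ext_iff_of_nodup (PySem.Set.nodup_ofList xs) hs.nodup_dedup]
      intro a
      rw [PySem.Set.mem_ofList, List.mem_dedup, hhs, PySem.List.mem_sorted]
    have step2 := hperm.countP_eq (fun v => decide ((v + 1) ∈ xs))
    have step3 : hs.dedup.countP (fun v => decide ((v + 1) ∈ xs)) =
        hs.dedup.countP (fun v => decide ((v + 1) ∈ hs)) := by
      apply List.countP_congr
      intro v hv
      simp [hhs, PySem.List.mem_sorted]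
    have hpair : hs.Pairwise (· ≤ ·) := PySem.List.sorted_pairwise xs (fun x => x)
    have step4 := adjCount_sorted hs hpair
    have hlen2 : (List.range (hs.length - 1)).countP
        (fun a => decide ¬decide (hs.getD a 0 = hs.getD (a + 1) 0 - 1) = true) =
        (List.range (hs.length - 1)).countP
        (fun x => !decide (hs.getD x 0 = hs.getD (x + 1) 0 - 1)) := by
      apply List.countP_congr
      intro x hx
      by_cases h : hs.getD x 0 = hs.getD (x + 1) 0 - 1 <;> simp [h]
    omega
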